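-- pv_equiv track=rewrite | github.com/kleeon0/Minecraft-PCG | Aco.py | build_grid_with_houses
-- ===== SOURCE A (Python) =====
-- def build_grid_with_houses(width, height, houses):
--     grid = [[0 for _ in range(width)] for _ in range(height)]
--     for house in houses:
--         (x1, z1), (x2, z2) = house
--         for z in range(int(z1), int(z2)+1):
--             for x in range(int(x1), int(x2)+1):
--                 if 0 <= z < height and 0 <= x < width:
--                     grid[z][x] = 1
--     return grid
-- ===== SOURCE B (Python) =====
-- def build_grid_with_houses(width, height, houses):
--     # Per-cell closed form: a cell is 1 iff some house rectangle covers it.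
--     return [[1 if any(x1 <= x <= x2 and z1 <= z <= z2 for (x1, z1), (x2, z2) in houses) else 0
--              for x in range(width)]
--             for z in range(height)]
-- ===== Notes on version B (the rewrite author's own statement) =====
-- stated objective: alternative
-- what changed: Replaces A's mutation of a grid by per-house nested coordinate loops with a direct per-cell comprehension that computes each cell as 'covered by some house', so no in-place updates and no iteration over rectangle coordinates.
import Mathlib
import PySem

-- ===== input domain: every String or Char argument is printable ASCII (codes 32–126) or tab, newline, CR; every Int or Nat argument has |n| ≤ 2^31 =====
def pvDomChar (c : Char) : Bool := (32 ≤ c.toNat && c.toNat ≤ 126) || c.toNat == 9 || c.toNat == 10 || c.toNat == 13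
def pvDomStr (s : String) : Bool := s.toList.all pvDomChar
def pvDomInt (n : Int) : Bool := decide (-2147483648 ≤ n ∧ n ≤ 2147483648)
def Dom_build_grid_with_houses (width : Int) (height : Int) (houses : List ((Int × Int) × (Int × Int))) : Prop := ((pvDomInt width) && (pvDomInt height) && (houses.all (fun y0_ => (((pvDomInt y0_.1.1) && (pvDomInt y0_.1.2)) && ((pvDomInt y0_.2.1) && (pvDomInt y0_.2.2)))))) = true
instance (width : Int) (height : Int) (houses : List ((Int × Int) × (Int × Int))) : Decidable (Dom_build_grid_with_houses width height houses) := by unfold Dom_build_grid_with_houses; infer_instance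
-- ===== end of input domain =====

-- B replaces A's per-house mutation loops with a per-cell "covered by some house" comprehension (alternative decomposition, same result).

-- ===== PORT A =====
-- grid[z][x] = 1 is ported with List.set at z.toNat / x.toNat: exact, because the guard
-- 0 ≤ z < height ∧ 0 ≤ x < width guarantees both indices are nonnegative and in range.
def build_grid_with_houses (width : Int) (height : Int) (houses : List ((Int × Int) × (Int × Int))) : List (List Int) :=
  let grid : List (List Int) :=
    (PySem.List.pyRange 0 height 1).map (fun _ => (PySem.List.pyRange 0 width 1).map (fun _ => (0 : Int)))
  houses.foldl (fun grid house =>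
    let x1 := house.1.1
    let z1 := house.1.2
    let x2 := house.2.1
    let z2 := house.2.2
    (PySem.List.pyRange z1 (z2 + 1) 1).foldl (fun grid z =>
      (PySem.List.pyRange x1 (x2 + 1) 1).foldl (fun grid x =>
        if 0 ≤ z ∧ z < height ∧ 0 ≤ x ∧ x < width then
          grid.set z.toNat ((grid.getD z.toNat []).set x.toNat 1)
        else grid) grid) grid) grid

-- ===== PORT B =====
def build_grid_with_houses_alt (width : Int) (height : Int) (houses : List ((Int × Int) × (Int × Int))) : List (List Int) :=
  (PySem.List.pyRange 0 height 1).map (fun z =>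
    (PySem.List.pyRange 0 width 1).map (fun x =>
      if houses.any (fun house =>
          decide (house.1.1 ≤ x) && decide (x ≤ house.2.1) && decide (house.1.2 ≤ z) && decide (z ≤ house.2.2))
      then (1 : Int) else 0))

-- ===== PRECONDITION & SPEC =====
def Spec_build_grid_with_houses (width : Int) (height : Int) (houses : List ((Int × Int) × (Int × Int))) (out : List (List Int)) : Prop := out = build_grid_with_houses_alt width height houses
instance (width : Int) (height : Int) (houses : List ((Int × Int) × (Int × Int))) (out : List (List Int)) : Decidable (Spec_build_grid_with_houses width height houses out) := by unfold Spec_build_grid_with_houses; infer_instance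

-- ===== CLAIM (what is proved, stated in full; the proofs are below) =====
def Claim_equal_build_grid_with_houses : Prop := ∀ (width : Int) (height : Int) (houses : List ((Int × Int) × (Int × Int))), Dom_build_grid_with_houses width height houses → Spec_build_grid_with_houses width height houses (build_grid_with_houses width height houses)

-- ===== LEMMAS AND PROOFS =====

-- grid whose cell (z, x) is 1 exactly when f z x
def pvGridOf (width height : Int) (f : Int → Int → Bool) : List (List Int) :=
  (PySem.List.pyRange 0 height 1).map (fun z =>
    (PySem.List.pyRange 0 width 1).map (fun x => if f z x then (1 : Int) else 0))

theorem pvGridOf_length (width height : Int) (f : Int → Int → Bool) :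
    (pvGridOf width height f).length = (height - 0).toNat := by
  simp [pvGridOf, PySem.List.length_pyRange_one]

theorem pvGridOf_congr (width height : Int) (f g : Int → Int → Bool)
    (h : ∀ z x, 0 ≤ z → z < height → 0 ≤ x → x < width → f z x = g z x) :
    pvGridOf width height f = pvGridOf width height g := by
  apply List.ext_getElem
  · simp [pvGridOf]
  · intro i h1 h2
    simp only [pvGridOf, List.getElem_map, PySem.List.getElem_pyRange_one]
    have hih : i < (height - 0).toNat := by
      rw [pvGridOf_length] at h1; exact h1
    apply List.ext_getElem
    · simp
    · intro j j1 j2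
      rw [List.length_map, PySem.List.length_pyRange_one] at j1
      simp only [List.getElem_map, PySem.List.getElem_pyRange_one]
      rw [h (0 + (i : Int)) (0 + (j : Int)) (by omega) (by omega) (by omega) (by omega)]

theorem pvContains_pyRange (a b x : Int) :
    (PySem.List.pyRange a b 1).contains x = decide (a ≤ x ∧ x < b) := by
  by_cases h : a ≤ x ∧ x < b <;> simp_all [PySem.List.mem_pyRange_one]

theorem pvBool1 (F C A T : Bool) : ((F || (C && A)) || (C && T)) = (F || (C && (A || T))) := by
  cases F <;> cases C <;> cases A <;> cases T <;> rfl

theorem pvBool2 (F A T X : Bool) : ((F || (A && X)) || (T && X)) = (F || ((A || T) && X)) := by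
  cases F <;> cases A <;> cases T <;> cases X <;> rfl

-- one guarded cell update on a pvGridOf grid
theorem pvGridOf_set (width height : Int) (f : Int → Int → Bool) (z x : Int) :
    (if 0 ≤ z ∧ z < height ∧ 0 ≤ x ∧ x < width then
        (pvGridOf width height f).set z.toNat
          (((pvGridOf width height f).getD z.toNat []).set x.toNat 1)
      else pvGridOf width height f)
    = pvGridOf width height (fun z' x' => f z' x' || (z' == z && x' == x)) := by
  by_cases hg : 0 ≤ z ∧ z < height ∧ 0 ≤ x ∧ x < width
  · obtain ⟨hz0, hzh, hx0, hxw⟩ := hg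
    rw [if_pos ⟨hz0, hzh, hx0, hxw⟩]
    have hlen : (pvGridOf width height f).length = (height - 0).toNat :=
      pvGridOf_length width height f
    have hzlen : z.toNat < (pvGridOf width height f).length := by rw [hlen]; omega
    have hrow : (pvGridOf width height f).getD z.toNat []
        = (PySem.List.pyRange 0 width 1).map (fun x' => if f z x' then (1 : Int) else 0) := by
      rw [List.getD_eq_getElem _ _ hzlen]
      simp only [pvGridOf, List.getElem_map, PySem.List.getElem_pyRange_one]
      rw [show (0 : Int) + (z.toNat : Int) = z from by omega]
    apply List.ext_getElem
    · simp [pvGridOf]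
    · intro i h1 h2
      have hih : i < (height - 0).toNat := by
        simpa [pvGridOf, PySem.List.length_pyRange_one] using h2
      rw [List.getElem_set]
      by_cases hiz : z.toNat = i
      · rw [if_pos hiz, hrow]
        have hzi : (0 : Int) + (i : Int) = z := by omega
        simp only [pvGridOf, List.getElem_map, PySem.List.getElem_pyRange_one, hzi]
        apply List.ext_getElem
        · simp
        · intro j j1 j2
          have hjw : j < (width - 0).toNat := by
            simpa [PySem.List.length_pyRange_one] using j2
          rw [List.getElem_set]
          simp only [List.getElem_map, PySem.List.getElem_pyRange_one, beq_self_eq_true,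
            Bool.true_and]
          by_cases hjx : x.toNat = j
          · have hxj : (0 : Int) + (j : Int) = x := by omega
            simp [hjx, hxj]
          · have hxj : ((j : Int)) ≠ x := by omega
            simp [hjx, hxj]
      · rw [if_neg hiz]
        simp only [pvGridOf, List.getElem_map, PySem.List.getElem_pyRange_one]
        have hzi : ((i : Int)) ≠ z := by omega
        simp [hzi]
  · rw [if_neg hg]
    apply pvGridOf_congr
    intro z' x' hz0 hzh hx0 hxw
    have : ¬(z' = z ∧ x' = x) := by
      intro ⟨h1, h2⟩; exact hg ⟨h1 ▸ hz0, h1 ▸ hzh, h2 ▸ hx0, h2 ▸ hxw⟩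
    by_cases hz : z' = z
    · have hx : x' ≠ x := fun h => this ⟨hz, h⟩
      simp [hx]
    · simp [hz]

-- the x-loop of A over an arbitrary list of x's
theorem pvInnerFold (width height z : Int) (xs : List Int) (f : Int → Int → Bool) :
    xs.foldl (fun grid x =>
        if 0 ≤ z ∧ z < height ∧ 0 ≤ x ∧ x < width then
          grid.set z.toNat ((grid.getD z.toNat []).set x.toNat 1)
        else grid) (pvGridOf width height f)
    = pvGridOf width height (fun z' x' => f z' x' || (z' == z && xs.contains x')) := by
  induction xs generalizing f with
  | nil => apply (pvGridOf_congr _ _ _ _ _).symm; intro z' x' _ _ _ _; simp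
  | cons a t ih =>
    simp only [List.foldl_cons]
    rw [pvGridOf_set, ih]
    apply pvGridOf_congr
    intro z' x' _ _ _ _
    rw [pvBool1]
    have hc : ((a :: t).contains x') = ((x' == a) || t.contains x') := by
      by_cases h : x' = a
      · subst h; simp
      · have hb1 : (x' == a) = false := by simp [h]
        have hb2 : (a == x') = false := by simp [Ne.symm h]
        simp [hb1]
        exact fun hh => absurd hh h
    rw [hc]

-- the z-loop of A over an arbitrary list of z's
theorem pvOuterFold (width height x1 x2 : Int) (zs : List Int) (f : Int → Int → Bool) :
    zs.foldl (fun grid z =>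
        (PySem.List.pyRange x1 (x2 + 1) 1).foldl (fun grid x =>
          if 0 ≤ z ∧ z < height ∧ 0 ≤ x ∧ x < width then
            grid.set z.toNat ((grid.getD z.toNat []).set x.toNat 1)
          else grid) grid) (pvGridOf width height f)
    = pvGridOf width height (fun z' x' =>
        f z' x' || (zs.contains z' && (PySem.List.pyRange x1 (x2 + 1) 1).contains x')) := by
  induction zs generalizing f with
  | nil => apply (pvGridOf_congr _ _ _ _ _).symm; intro z' x' _ _ _ _; simp
  | cons a t ih =>
    simp only [List.foldl_cons]
    rw [pvInnerFold, ih]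
    apply pvGridOf_congr
    intro z' x' _ _ _ _
    rw [pvBool2]
    have hc : ((a :: t).contains z') = ((z' == a) || t.contains z') := by
      by_cases h : z' = a
      · subst h; simp
      · have hb1 : (z' == a) = false := by simp [h]
        have hb2 : (a == z') = false := by simp [Ne.symm h]
        simp [hb1]
        exact fun hh => absurd hh h
    rw [hc]

theorem pvCoverEq (x1 z1 x2 z2 z x : Int) :
    (decide (z1 ≤ z ∧ z < z2 + 1) && decide (x1 ≤ x ∧ x < x2 + 1))
    = (decide (x1 ≤ x) && decide (x ≤ x2) && decide (z1 ≤ z) && decide (z ≤ z2)) := by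
  have hz : decide (z1 ≤ z ∧ z < z2 + 1) = decide (z1 ≤ z ∧ z ≤ z2) :=
    decide_eq_decide.mpr (by omega)
  have hx : decide (x1 ≤ x ∧ x < x2 + 1) = decide (x1 ≤ x ∧ x ≤ x2) :=
    decide_eq_decide.mpr (by omega)
  rw [hz, hx]
  by_cases h1 : x1 ≤ x <;> by_cases h2 : x ≤ x2 <;> by_cases h3 : z1 ≤ z <;>
    by_cases h4 : z ≤ z2 <;> simp [h1, h2, h3, h4]

-- the houses loop of A
theorem pvHousesFold (width height : Int) (houses : List ((Int × Int) × (Int × Int)))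
    (f : Int → Int → Bool) :
    houses.foldl (fun grid house =>
        (PySem.List.pyRange house.1.2 (house.2.2 + 1) 1).foldl (fun grid z =>
          (PySem.List.pyRange house.1.1 (house.2.1 + 1) 1).foldl (fun grid x =>
            if 0 ≤ z ∧ z < height ∧ 0 ≤ x ∧ x < width then
              grid.set z.toNat ((grid.getD z.toNat []).set x.toNat 1)
            else grid) grid) grid) (pvGridOf width height f)
    = pvGridOf width height (fun z x => f z x || houses.any (fun house =>
        decide (house.1.1 ≤ x) && decide (x ≤ house.2.1) && decide (house.1.2 ≤ z) && decide (z ≤ house.2.2))) := by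
  induction houses generalizing f with
  | nil => apply (pvGridOf_congr _ _ _ _ _).symm; intro z' x' _ _ _ _; simp
  | cons h0 t ih =>
    simp only [List.foldl_cons]
    rw [pvOuterFold, ih]
    apply pvGridOf_congr
    intro z x _ _ _ _
    rw [pvContains_pyRange, pvContains_pyRange, pvCoverEq, Bool.or_assoc]
    rw [List.any_cons]

-- ===== VERDICT (by name: the statement is the Claim_ definition above) =====
theorem build_grid_with_houses_spec : Claim_equal_build_grid_with_houses := by
  unfold Claim_equal_build_grid_with_houses
  intro width height houses _
  unfold Spec_build_grid_with_houses build_grid_with_houses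
  have hinit : (PySem.List.pyRange 0 height 1).map
      (fun _ => (PySem.List.pyRange 0 width 1).map (fun _ => (0 : Int)))
      = pvGridOf width height (fun _ _ => false) := by
    simp [pvGridOf]
  rw [hinit, pvHousesFold]
  apply List.ext_getElem
  · simp [pvGridOf, build_grid_with_houses_alt]
  · intro i h1 h2
    simp only [pvGridOf, build_grid_with_houses_alt, List.getElem_map, Bool.false_or]
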